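-- pv_equiv track=rewrite | github.com/EzeLazzara/GolazoNET | scraper/scraper.py | asignar_zonas
-- ===== SOURCE A (Python) =====
-- def asignar_zonas(equipos, tipo="primera"):
--     """
--     Colorea las zonas según posición en la tabla.
--     Liga Profesional: top3=Libertadores, 4-6=Sudamericana, últimos3=Descenso
--     """
--     n = len(equipos)
--     for idx, e in enumerate(equipos):
--         pos = idx + 1
--         if tipo == "primera":
--             if pos <= 3:
--                 e["zona"] = "champions"
--             elif pos <= 6:
--                 e["zona"] = "europa"
--             elif pos > n - 3:
--                 e["zona"] = "descenso"
--             else: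
--                 e["zona"] = "normal"
--         else:  # nacional/federal
--             if pos <= 2:
--                 e["zona"] = "promotion"
--             elif pos > n - 2:
--                 e["zona"] = "descenso"
--             else:
--                 e["zona"] = "normal"
--     return equipos
-- ===== SOURCE B (Python) =====
-- def asignar_zonas(equipos, tipo="primera"):
--     n = len(equipos)
--     for e in equipos:
--         e["zona"] = "normal"
--     if tipo == "primera":
--         for e in equipos[max(n - 3, 0):]:
--             e["zona"] = "descenso"
--         for e in equipos[:3]:
--             e["zona"] = "champions"
--         for e in equipos[3:6]:
--             e["zona"] = "europa"
--     else:
--         for e in equipos[max(n - 2, 0):]: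
--             e["zona"] = "descenso"
--         for e in equipos[:2]:
--             e["zona"] = "promotion"
--     return equipos
-- ===== Notes on version B (the rewrite author's own statement) =====
-- stated objective: alternative
-- what changed: Replaced A's per-element elif chain with segment writes: every team is set to 'normal', then the descenso slice, then the champions/europa (or promotion) slices are overwritten in priority order.
import Mathlib
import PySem

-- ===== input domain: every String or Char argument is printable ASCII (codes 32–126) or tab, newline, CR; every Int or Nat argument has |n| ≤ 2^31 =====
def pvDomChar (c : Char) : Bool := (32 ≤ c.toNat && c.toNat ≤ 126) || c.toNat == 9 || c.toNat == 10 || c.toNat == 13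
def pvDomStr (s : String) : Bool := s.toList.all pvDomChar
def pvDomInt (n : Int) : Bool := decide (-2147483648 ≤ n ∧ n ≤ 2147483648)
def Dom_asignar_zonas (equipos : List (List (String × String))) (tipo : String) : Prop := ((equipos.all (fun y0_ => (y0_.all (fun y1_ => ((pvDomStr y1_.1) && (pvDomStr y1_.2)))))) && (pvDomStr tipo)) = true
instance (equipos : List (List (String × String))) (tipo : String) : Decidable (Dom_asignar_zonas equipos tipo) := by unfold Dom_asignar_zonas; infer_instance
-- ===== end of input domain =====

-- B replaces A's per-element elif chain by whole-segment writes ('normal' everywhere, then the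
-- descenso / champions / europa / promotion slices in priority order): a different decomposition,
-- same cost. A mutates the dicts in place and returns the same list; this file is about the
-- return value only (B performs the same mutation in Python).

-- ===== PORT A =====
-- d["zona"] = v on an insertion-ordered dict: overwrite the (unique) existing key in place,
-- else append; shared dict primitive used by both ports.
def dictSet : List (String × String) → String → String → List (String × String)
  | [], k, v => [(k, v)]
  | p :: rest, k, v => if p.1 == k then (k, v) :: rest else p :: dictSet rest k v

def asignar_zonas (equipos : List (List (String × String))) (tipo : String) : List (List (String × String)) :=
  let n : Int := equipos.length
  (PySem.List.enumerate equipos 0).map (fun ie =>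
    let pos : Int := ie.1 + 1
    let e := ie.2
    if tipo == "primera" then
      if pos ≤ 3 then dictSet e "zona" "champions"
      else if pos ≤ 6 then dictSet e "zona" "europa"
      else if pos > n - 3 then dictSet e "zona" "descenso"
      else dictSet e "zona" "normal"
    else
      if pos ≤ 2 then dictSet e "zona" "promotion"
      else if pos > n - 2 then dictSet e "zona" "descenso"
      else dictSet e "zona" "normal")

-- ===== PORT B =====
-- immutable model of Source B's "for e in equipos[a:b]: e['zona'] = v" (the slice aliases the same
-- dict objects, so the write lands at indices a ≤ i < b of the list itself)
def setZonaRange (xs : List (List (String × String))) (a b : Int) (v : String) : List (List (String × String)) :=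
  (PySem.List.enumerate xs 0).map (fun ie => if a ≤ ie.1 ∧ ie.1 < b then dictSet ie.2 "zona" v else ie.2)

def asignar_zonas_alt (equipos : List (List (String × String))) (tipo : String) : List (List (String × String)) :=
  let n : Int := equipos.length
  let base := equipos.map (fun e => dictSet e "zona" "normal")
  if tipo == "primera" then
    setZonaRange (setZonaRange (setZonaRange base (max (n - 3) 0) n "descenso") 0 3 "champions") 3 6 "europa"
  else
    setZonaRange (setZonaRange base (max (n - 2) 0) n "descenso") 0 2 "promotion"

-- ===== PRECONDITION & SPEC =====
def Spec_asignar_zonas (equipos : List (List (String × String))) (tipo : String) (out : List (List (String × String))) : Prop := out = asignar_zonas_alt equipos tipo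
instance (equipos : List (List (String × String))) (tipo : String) (out : List (List (String × String))) : Decidable (Spec_asignar_zonas equipos tipo out) := by unfold Spec_asignar_zonas; infer_instance

-- ===== CLAIM (what is proved, stated in full; the proofs are below) =====
def Claim_equal_asignar_zonas : Prop := ∀ (equipos : List (List (String × String))) (tipo : String), Dom_asignar_zonas equipos tipo → Spec_asignar_zonas equipos tipo (asignar_zonas equipos tipo)

-- ===== LEMMAS AND PROOFS =====

theorem dictSet_dictSet (e : List (String × String)) (k v v' : String) :
    dictSet (dictSet e k v) k v' = dictSet e k v' := by
  induction e with
  | nil => simp [dictSet]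
  | cons p rest ih => by_cases h : p.1 == k <;> simp [dictSet, h, ih]

@[simp] theorem length_setZonaRange (xs : List (List (String × String))) (a b : Int) (v : String) :
    (setZonaRange xs a b v).length = xs.length := by
  simp [setZonaRange, PySem.List.length_enumerate]

theorem getElem_setZonaRange (xs : List (List (String × String))) (a b : Int) (v : String)
    (k : Nat) (h : k < xs.length) :
    (setZonaRange xs a b v)[k]'(by simpa using h) =
      if a ≤ (k : Int) ∧ (k : Int) < b then dictSet (xs[k]'h) "zona" v else xs[k]'h := by
  simp [setZonaRange, PySem.List.getElem_enumerate]

-- ===== VERDICT (by name: the statement is the Claim_ definition above) =====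
theorem asignar_zonas_spec : Claim_equal_asignar_zonas := by
  intro equipos tipo _
  unfold Spec_asignar_zonas asignar_zonas asignar_zonas_alt
  by_cases ht : tipo == "primera" <;>
    · simp only [ht, if_true, if_false, Bool.false_eq_true]
      apply List.ext_getElem
      · simp [PySem.List.length_enumerate]
      · intro i h1 h2
        have hi : i < equipos.length := by simpa [PySem.List.length_enumerate] using h1
        simp only [List.getElem_map, PySem.List.getElem_enumerate,
          getElem_setZonaRange, length_setZonaRange, List.length_map, hi]
        split_ifs <;> simp_all <;> first | omega | (simp [dictSet_dictSet])
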